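-- pv_equiv track=rewrite | github.com/jaimarvelquant/digitalocean_uploador | validation_nautilus/demo_validation_v2.py | extract_symbol_from_filepath
-- ===== SOURCE A (Python) =====
-- def extract_symbol_from_filepath(filepath):
--     """
--     Extract symbol from file path when content extraction fails
--     Handles paths like: nautilus_catalog/data/bar/CRUDEOIL-I.NSE-1-TICK-LAST-EXTERNAL/date.parquet
--     """
--     path_parts = filepath.split('/')
--
--     # Look for symbol-like parts in the path
--     for part in path_parts:
--         part_upper = part.upper()
--         # Check for various crude oil patterns
--         if 'CRUDEOIL' in part_upper:
--             # Extract the full instrument name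
--             return part_upper
--
--     # Fallback patterns
--     for part in path_parts:
--         part_upper = part.upper()
--         if any(keyword in part_upper for keyword in ['CRUDE', 'OIL', 'NSE']):
--             # Clean up the part to get a meaningful symbol
--             if 'NSE' in part_upper:
--                 return part_upper
--             elif 'CRUDE' in part_upper:
--                 return part_upper
--
--     return None
-- ===== SOURCE B (Python) =====
-- def extract_symbol_from_filepath(filepath):
--     """Single pass: return first CRUDEOIL part immediately; otherwise remember the
--     first NSE/CRUDE part as a fallback (never OIL alone) and return it at the end."""
--     fallback = None
--     for part in filepath.split('/'):
--         part_upper = part.upper()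
--         if 'CRUDEOIL' in part_upper:
--             return part_upper
--         if fallback is None and ('NSE' in part_upper or 'CRUDE' in part_upper):
--             fallback = part_upper
--     return fallback
-- ===== Notes on version B (the rewrite author's own statement) =====
-- stated objective: simpler
-- what changed: Fuses A's two sequential scans over the path parts into one pass that returns a CRUDEOIL part immediately and otherwise remembers the first NSE/CRUDE part as a fallback candidate.
import Mathlib
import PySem

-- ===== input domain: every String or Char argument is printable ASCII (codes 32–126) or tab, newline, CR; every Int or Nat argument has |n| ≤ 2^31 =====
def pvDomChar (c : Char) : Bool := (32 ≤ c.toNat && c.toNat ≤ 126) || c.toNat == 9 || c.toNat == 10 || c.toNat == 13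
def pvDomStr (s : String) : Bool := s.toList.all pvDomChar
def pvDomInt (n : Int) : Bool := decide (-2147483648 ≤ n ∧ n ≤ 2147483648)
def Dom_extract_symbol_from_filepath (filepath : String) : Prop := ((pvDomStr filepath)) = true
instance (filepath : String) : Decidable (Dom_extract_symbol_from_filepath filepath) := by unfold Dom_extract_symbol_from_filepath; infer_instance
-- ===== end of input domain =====

-- ===== PORT A =====
-- A: first loop returns the first part containing 'CRUDEOIL' (uppercased);
-- second loop returns the first part containing 'NSE' or 'CRUDE' (the 'OIL'-only case falls through).
def pvA_loop1 : List String → Option String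
  | [] => none
  | p :: rest =>
    let part_upper := PySem.Str.upper p
    if PySem.Str.isIn "CRUDEOIL" part_upper then some part_upper
    else pvA_loop1 rest

def pvA_loop2 : List String → Option String
  | [] => none
  | p :: rest =>
    let part_upper := PySem.Str.upper p
    if PySem.Str.isIn "CRUDE" part_upper || PySem.Str.isIn "OIL" part_upper || PySem.Str.isIn "NSE" part_upper then
      if PySem.Str.isIn "NSE" part_upper then some part_upper
      else if PySem.Str.isIn "CRUDE" part_upper then some part_upper
      else pvA_loop2 rest
    else pvA_loop2 rest

def extract_symbol_from_filepath (filepath : String) : Option String :=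
  let path_parts := (PySem.Str.split? filepath "/").getD []
  match pvA_loop1 path_parts with
  | some r => some r
  | none => pvA_loop2 path_parts

-- ===== PORT B =====
-- B: one pass, returning on CRUDEOIL immediately, carrying the first NSE/CRUDE fallback.
def pvB_loop : List String → Option String → Option String
  | [], fallback => fallback
  | p :: rest, fallback =>
    let part_upper := PySem.Str.upper p
    if PySem.Str.isIn "CRUDEOIL" part_upper then some part_upper
    else
      let fallback' :=
        if fallback.isNone && (PySem.Str.isIn "NSE" part_upper || PySem.Str.isIn "CRUDE" part_upper) then
          some part_upper
        else fallback
      pvB_loop rest fallback'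

def extract_symbol_from_filepath_alt (filepath : String) : Option String :=
  pvB_loop ((PySem.Str.split? filepath "/").getD []) none

-- ===== PRECONDITION & SPEC =====
def Spec_extract_symbol_from_filepath (filepath : String) (out : Option String) : Prop := out = extract_symbol_from_filepath_alt filepath
instance (filepath : String) (out : Option String) : Decidable (Spec_extract_symbol_from_filepath filepath out) := by unfold Spec_extract_symbol_from_filepath; infer_instance

-- ===== CLAIM (what is proved, stated in full; the proofs are below) =====
def Claim_equal_extract_symbol_from_filepath : Prop := ∀ (filepath : String), Dom_extract_symbol_from_filepath filepath → Spec_extract_symbol_from_filepath filepath (extract_symbol_from_filepath filepath)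

-- ===== LEMMAS AND PROOFS =====

-- B's fused loop equals A's two-phase result: an already-recorded fallback survives
-- unless loop1 fires; with no fallback yet, loop2 supplies it.
theorem pvB_loop_eq (l : List String) (fb : Option String) :
    pvB_loop l fb =
      match pvA_loop1 l with
      | some r => some r
      | none => match fb with
        | some v => some v
        | none => pvA_loop2 l := by
  induction l generalizing fb with
  | nil => cases fb <;> rfl
  | cons p rest ih =>
    by_cases h1 : PySem.Chars.isIn ['C','R','U','D','E','O','I','L'] (PySem.Chars.upper p.toList) = true
    · simp [pvB_loop, pvA_loop1, h1]
    · cases fb with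
      | some v => simp [pvB_loop, pvA_loop1, h1, ih]
      | none =>
        by_cases hn : PySem.Chars.isIn ['N','S','E'] (PySem.Chars.upper p.toList) = true <;>
        by_cases hc : PySem.Chars.isIn ['C','R','U','D','E'] (PySem.Chars.upper p.toList) = true <;>
        by_cases ho : PySem.Chars.isIn ['O','I','L'] (PySem.Chars.upper p.toList) = true <;>
        simp [pvB_loop, pvA_loop1, pvA_loop2, h1, hn, hc, ho, ih]

-- ===== VERDICT (by name: the statement is the Claim_ definition above) =====
theorem extract_symbol_from_filepath_spec : Claim_equal_extract_symbol_from_filepath := by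
  intro filepath _
  unfold Spec_extract_symbol_from_filepath extract_symbol_from_filepath extract_symbol_from_filepath_alt
  rw [pvB_loop_eq]
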